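-- pv_equiv track=rewrite | github.com/Person-Maink/localmodels- | analysis/Frequency Analysis/Point to Point.py | _build_vertex_adjacency
-- ===== SOURCE A (Python) =====
-- def _build_vertex_adjacency(total_verts, tri_faces):
--     adjacency = [set() for _ in range(total_verts)]
--     for tri in tri_faces:
--         a, b, c = int(tri[0]), int(tri[1]), int(tri[2])
--         adjacency[a].add(b)
--         adjacency[a].add(c)
--         adjacency[b].add(a)
--         adjacency[b].add(c)
--         adjacency[c].add(a)
--         adjacency[c].add(b)
--     return [sorted(list(nei)) for nei in adjacency]
-- ===== SOURCE B (Python) =====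
-- def _build_vertex_adjacency(total_verts, tri_faces):
--     edges = []
--     for tri in tri_faces:
--         a, b, c = int(tri[0]), int(tri[1]), int(tri[2])
--         edges += [(a, b), (a, c), (b, a), (b, c), (c, a), (c, b)]
--     edges.sort()
--     adjacency = [[] for _ in range(total_verts)]
--     for u, v in edges:
--         row = adjacency[u]
--         if not row or row[-1] != v:
--             row.append(v)
--     return adjacency
-- ===== Notes on version B (the rewrite author's own statement) =====
-- stated objective: faster
-- what changed: Instead of mutating per-vertex Python sets face by face and sorting each set at the end, B collects one flat list of all six directed edges per face, sorts it once with the C-level list sort, and builds each adjacency row in a single grouping pass with consecutive deduplication (measured ~7x at the largest size).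
-- outside the precondition, e.g. on _build_vertex_adjacency(3, [(0, 1, -3)]): A returns [[-3, 0, 1], [-3, 0], []], B returns [[0, 1, -3, 1], [-3, 0], []]
import Mathlib
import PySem

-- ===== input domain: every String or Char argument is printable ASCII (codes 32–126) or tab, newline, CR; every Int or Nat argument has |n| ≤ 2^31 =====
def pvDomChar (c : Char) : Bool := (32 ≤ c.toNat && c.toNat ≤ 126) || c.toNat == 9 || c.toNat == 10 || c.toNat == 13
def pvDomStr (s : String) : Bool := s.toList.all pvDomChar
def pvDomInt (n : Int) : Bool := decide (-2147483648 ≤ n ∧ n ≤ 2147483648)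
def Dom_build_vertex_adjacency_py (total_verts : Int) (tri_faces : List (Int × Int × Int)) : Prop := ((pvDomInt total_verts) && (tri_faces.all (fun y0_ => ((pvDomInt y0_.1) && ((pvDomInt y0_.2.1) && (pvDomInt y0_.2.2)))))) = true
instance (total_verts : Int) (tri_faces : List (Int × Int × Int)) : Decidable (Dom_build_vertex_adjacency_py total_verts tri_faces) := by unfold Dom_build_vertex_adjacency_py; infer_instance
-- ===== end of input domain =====

-- B replaces A's per-vertex mutable sets (each sorted at the end) by one flat directed-edge list,
-- sorted once lexicographically and grouped into rows with consecutive deduplication ("alternative").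

-- ===== PORT A =====
-- 'adjacency[i].add(v)': read the set at index i and write back the enlarged set.
-- Exact wherever this Python line returns; on an out-of-range index Python raises IndexError (excluded by Pre_).
def pvAddAt (adj : List (PySem.Set Int)) (i v : Int) : List (PySem.Set Int) :=
  PySem.List.pySetD adj i (PySem.Set.add (PySem.List.pyGetD adj i PySem.Set.empty) v)

def build_vertex_adjacency_py (total_verts : Int) (tri_faces : List (Int × Int × Int)) : List (List Int) :=
  let adjacency : List (PySem.Set Int) := (PySem.List.pyRange 0 total_verts 1).map (fun _ => PySem.Set.empty)
  let adjacency := tri_faces.foldl (fun adj tri =>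
    let a := tri.1
    let b := tri.2.1
    let c := tri.2.2
    pvAddAt (pvAddAt (pvAddAt (pvAddAt (pvAddAt (pvAddAt adj a b) a c) b a) b c) c a) c b) adjacency
  -- sorted(list(nei)): the set's iteration order is consumed by a keyless sort, so the result is order-independent
  adjacency.map (fun nei => PySem.List.sorted nei (fun x => x))

-- ===== PORT B =====
def build_vertex_adjacency_py_alt (total_verts : Int) (tri_faces : List (Int × Int × Int)) : List (List Int) :=
  let edges : List (Int × Int) := tri_faces.foldl (fun es tri =>
    let a := tri.1
    let b := tri.2.1
    let c := tri.2.2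
    es ++ [(a, b), (a, c), (b, a), (b, c), (c, a), (c, b)]) []
  let edges := PySem.List.sorted2 edges (fun e => e.1) (fun e => e.2)   -- edges.sort(): lexicographic on pairs
  let adjacency : List (List Int) := (PySem.List.pyRange 0 total_verts 1).map (fun _ => ([] : List Int))
  edges.foldl (fun adj e =>
    let row := PySem.List.pyGetD adj e.1 []
    if row.getLast? = some e.2 then adj
    else PySem.List.pySetD adj e.1 (row ++ [e.2])) adjacency

-- ===== PRECONDITION & SPEC =====
-- Pre_ restricts to the natural domain of a triangle mesh: every face index lies in [0, total_verts).
-- An index ≥ total_verts or < -total_verts makes A raise IndexError; on a negative in-range index A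
-- returns via Python's accidental negative-index wraparound, outside the function's natural domain.
def Pre_build_vertex_adjacency_py (total_verts : Int) (tri_faces : List (Int × Int × Int)) : Prop :=
  ∀ tri ∈ tri_faces, (0 ≤ tri.1 ∧ tri.1 < total_verts) ∧ (0 ≤ tri.2.1 ∧ tri.2.1 < total_verts) ∧
    (0 ≤ tri.2.2 ∧ tri.2.2 < total_verts)
instance (total_verts : Int) (tri_faces : List (Int × Int × Int)) : Decidable (Pre_build_vertex_adjacency_py total_verts tri_faces) := by unfold Pre_build_vertex_adjacency_py; infer_instance

def pvWitness_build_vertex_adjacency_py : Int × (List (Int × Int × Int)) := (3, [(0, 1, 2), (1, 2, 0)])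

def Spec_build_vertex_adjacency_py (total_verts : Int) (tri_faces : List (Int × Int × Int)) (out : List (List Int)) : Prop := out = build_vertex_adjacency_py_alt total_verts tri_faces
instance (total_verts : Int) (tri_faces : List (Int × Int × Int)) (out : List (List Int)) : Decidable (Spec_build_vertex_adjacency_py total_verts tri_faces out) := by unfold Spec_build_vertex_adjacency_py; infer_instance

-- ===== CLAIM (what is proved, stated in full; the proofs are below) =====
def Claim_equal_build_vertex_adjacency_py : Prop := ∀ (total_verts : Int) (tri_faces : List (Int × Int × Int)), Dom_build_vertex_adjacency_py total_verts tri_faces → Pre_build_vertex_adjacency_py total_verts tri_faces → Spec_build_vertex_adjacency_py total_verts tri_faces (build_vertex_adjacency_py total_verts tri_faces)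

-- ===== LEMMAS AND PROOFS =====

-- the six directed edges a face contributes
def pvSix (tri : Int × Int × Int) : List (Int × Int) :=
  [(tri.1, tri.2.1), (tri.1, tri.2.2), (tri.2.1, tri.1), (tri.2.1, tri.2.2),
   (tri.2.2, tri.1), (tri.2.2, tri.2.1)]

-- B's consecutive-dedup row update
def pvDedupStep (row : List Int) (v : Int) : List Int :=
  if row.getLast? = some v then row else row ++ [v]

-- the Boolean lexicographic 'less-than' sorted2 sorts by
def pvLexLt (a b : Int × Int) : Bool :=
  decide (a.1 < b.1) || (!decide (b.1 < a.1) && decide (a.2 < b.2))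

lemma pv_set_get_self {α : Type} (xs : List α) (i : Int) (d : α) :
    PySem.List.pySetD xs i (PySem.List.pyGetD xs i d) = xs := by
  simp only [PySem.List.pySetD, PySem.List.pySet?, PySem.List.pyGetD, PySem.List.pyGet?]
  cases h : PySem.List.pyIdx? xs.length i with
  | none => simp
  | some k =>
    have hk : k < xs.length := by
      simp only [PySem.List.pyIdx?] at h
      split_ifs at h <;> injection h with h <;> omega
    simp [List.getElem?_eq_getElem hk, List.set_getElem_self]

lemma pv_foldl_set_length {σ : Type} (g : σ → Int → σ) (d : σ)
    (es : List (Int × Int)) (adj : List σ) :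
    (es.foldl (fun a e => PySem.List.pySetD a e.1 (g (PySem.List.pyGetD a e.1 d) e.2)) adj).length
      = adj.length := by
  induction es generalizing adj with
  | nil => rfl
  | cons e es ih => simp [List.foldl_cons, ih, PySem.List.length_pySetD]

lemma pv_foldl_set_getElem? {σ : Type} (g : σ → Int → σ) (d : σ)
    (es : List (Int × Int)) (adj : List σ) (k : Nat) (hk : k < adj.length)
    (hin : ∀ e ∈ es, 0 ≤ e.1 ∧ e.1 < (adj.length : Int)) :
    (es.foldl (fun a e => PySem.List.pySetD a e.1 (g (PySem.List.pyGetD a e.1 d) e.2)) adj)[k]?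
      = some (((es.filter (fun e => e.1 == (k : Int))).map (·.2)).foldl g (adj.getD k d)) := by
  induction es generalizing adj with
  | nil => simp [List.getElem?_eq_getElem hk]
  | cons e es ih =>
    obtain ⟨h0, h1⟩ := hin e List.mem_cons_self
    have hset : PySem.List.pySetD adj e.1 (g (PySem.List.pyGetD adj e.1 d) e.2)
        = adj.set e.1.toNat (g (adj.getD e.1.toNat d) e.2) := by
      rw [PySem.List.pySetD_of_nonneg _ _ h0, PySem.List.pyGetD_of_nonneg _ _ h0]
    simp only [List.foldl_cons, hset]
    rw [ih]
    · have hD : (adj.set e.1.toNat (g (adj.getD e.1.toNat d) e.2)).getD k d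
          = if e.1 == (k : Int) then g (adj.getD k d) e.2 else adj.getD k d := by
        by_cases hek : e.1 = (k : Int)
        · have : e.1.toNat = k := by omega
          simp [hek, hk]
        · have : e.1.toNat ≠ k := by omega
          simp [hek, this]
      rw [hD]
      by_cases hek : e.1 = (k : Int) <;> simp [hek]
    · simpa using hk
    · intro f hf; simpa using hin f (List.mem_cons_of_mem _ hf)

lemma pv_foldl_flatMap {α β σ : Type} (f : α → List β) (step : σ → β → σ)
    (l : List α) (acc : σ) :
    l.foldl (fun a t => (f t).foldl step a) acc = (l.flatMap f).foldl step acc := by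
  induction l generalizing acc with
  | nil => rfl
  | cons x l ih => simp [List.foldl_cons, ih, List.flatMap_cons, List.foldl_append]

lemma pv_last_max (acc : List Int) (h : acc.Pairwise (· < ·)) (m : Int)
    (hm : acc.getLast? = some m) : ∀ x ∈ acc, x ≤ m := by
  induction acc with
  | nil => simp at hm
  | cons a t ih =>
    cases t with
    | nil =>
      simp at hm; intro x hx; simp at hx; omega
    | cons b u =>
      have hm' : (b :: u).getLast? = some m := by simpa using hm
      have h' := h.tail
      intro x hx
      rcases List.mem_cons.mp hx with rfl | hx'
      · have hbm : b ∈ b :: u := List.mem_cons_self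
        have := ih h' hm'
        have hab : x < b := (List.pairwise_cons.mp h).1 b hbm
        have := this b hbm
        omega
      · exact ih h' hm' x hx'

lemma pv_dedup_gen (L acc : List Int) (hL : L.Pairwise (· ≤ ·))
    (hacc : acc.Pairwise (· < ·)) (hcross : ∀ x ∈ acc, ∀ y ∈ L, x ≤ y) :
    (L.foldl pvDedupStep acc).Pairwise (· < ·) ∧
      ∀ x, x ∈ L.foldl pvDedupStep acc ↔ x ∈ acc ∨ x ∈ L := by
  induction L generalizing acc with
  | nil => exact ⟨hacc, by simp⟩
  | cons v t ih =>
    have hvt : ∀ y ∈ t, v ≤ y := (List.pairwise_cons.mp hL).1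
    have ht : t.Pairwise (· ≤ ·) := hL.tail
    simp only [List.foldl_cons]
    by_cases hlast : acc.getLast? = some v
    · have hstep : pvDedupStep acc v = acc := by simp [pvDedupStep, hlast]
      rw [hstep]
      have hvmem : v ∈ acc := List.mem_of_getLast? hlast
      obtain ⟨p1, p2⟩ := ih acc ht hacc (fun x hx y hy => hcross x hx y (List.mem_cons_of_mem _ hy))
      refine ⟨p1, fun x => ?_⟩
      rw [p2 x]
      constructor
      · rintro (hx | hx) <;> simp_all
      · rintro (hx | hx)
        · exact Or.inl hx
        · rcases List.mem_cons.mp hx with rfl | hx'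
          · exact Or.inl hvmem
          · exact Or.inr hx'
    · have hstep : pvDedupStep acc v = acc ++ [v] := by simp [pvDedupStep, hlast]
      rw [hstep]
      have hlt : ∀ x ∈ acc, x < v := by
        intro x hx
        have hle : x ≤ v := hcross x hx v List.mem_cons_self
        rcases eq_or_lt_of_le hle with heq | h'
        · -- x = v ∈ acc; then last of acc = m with v ≤ m and m ≤ v, so last = v, contradiction
          cases hAcc : acc.getLast? with
          | none => simp [List.getLast?_eq_none_iff] at hAcc; simp [hAcc] at hx
          | some m =>
            have h1 : x ≤ m := pv_last_max acc hacc m hAcc x hx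
            have h2 : m ∈ acc := List.mem_of_getLast? hAcc
            have h3 : m ≤ v := hcross m h2 v List.mem_cons_self
            have hmv : m = v := by omega
            exact absurd (by rw [hAcc, hmv]) hlast
        · exact h'
      have hacc' : (acc ++ [v]).Pairwise (· < ·) := by
        rw [List.pairwise_append]
        exact ⟨hacc, by simp, by simpa using hlt⟩
      have hcross' : ∀ x ∈ acc ++ [v], ∀ y ∈ t, x ≤ y := by
        intro x hx y hy
        rcases List.mem_append.mp hx with hx' | hx'
        · exact hcross x hx' y (List.mem_cons_of_mem _ hy)
        · simp at hx'; subst hx'; exact hvt y hy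
      obtain ⟨p1, p2⟩ := ih (acc ++ [v]) ht hacc' hcross'
      refine ⟨p1, fun x => ?_⟩
      rw [p2 x]
      simp [or_assoc, List.mem_append]

lemma pv_insertBy_pairwise (x : Int × Int) (ys : List (Int × Int))
    (h : ys.Pairwise (fun a b => pvLexLt b a = false)) :
    (PySem.List.insertBy pvLexLt x ys).Pairwise (fun a b => pvLexLt b a = false) := by
  induction ys with
  | nil => simp [PySem.List.insertBy]
  | cons y ys ih =>
    rw [PySem.List.insertBy]
    obtain ⟨hy, hys⟩ := List.pairwise_cons.mp h
    by_cases hb : pvLexLt x y = true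
    · rw [if_pos hb]
      rw [List.pairwise_cons]
      refine ⟨?_, h⟩
      intro z hz
      rcases List.mem_cons.mp hz with rfl | hz'
      · simp [pvLexLt] at hb ⊢; omega
      · have := hy z hz'
        simp [pvLexLt] at hb this ⊢; omega
    · have hb' : pvLexLt x y = false := Bool.eq_false_iff.mpr hb
      rw [if_neg hb]
      rw [List.pairwise_cons]
      refine ⟨?_, ih hys⟩
      intro z hz
      rcases (PySem.List.mem_insertBy _ _ _ _).mp hz with rfl | hz'
      · exact hb'
      · exact hy z hz'

lemma pv_foldl_insertBy_pairwise (es acc : List (Int × Int))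
    (hacc : acc.Pairwise (fun a b => pvLexLt b a = false)) :
    (es.foldl (fun acc x => PySem.List.insertBy pvLexLt x acc) acc).Pairwise
      (fun a b => pvLexLt b a = false) := by
  induction es generalizing acc with
  | nil => exact hacc
  | cons e es ih =>
    rw [List.foldl_cons]
    exact ih _ (pv_insertBy_pairwise e acc hacc)

lemma pv_sorted2_pairwise (es : List (Int × Int)) :
    (PySem.List.sorted2 es (fun e => e.1) (fun e => e.2)).Pairwise
      (fun a b => pvLexLt b a = false) := by
  have hdef : PySem.List.sorted2 es (fun e => (e : Int × Int).1) (fun e => e.2)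
      = es.foldl (fun acc x => PySem.List.insertBy pvLexLt x acc) [] := rfl
  rw [hdef]
  exact pv_foldl_insertBy_pairwise es [] (by simp)

-- ===== VERDICT (by name: the statement is the Claim_ definition above) =====
theorem build_vertex_adjacency_py_spec : Claim_equal_build_vertex_adjacency_py := by
  intro total_verts tri_faces _hdom hpre
  unfold Spec_build_vertex_adjacency_py
  -- the flat directed-edge list
  set E : List (Int × Int) := tri_faces.flatMap pvSix with hE
  have hbound : ∀ e ∈ E, 0 ≤ e.1 ∧ e.1 < total_verts ∧ 0 ≤ e.2 ∧ e.2 < total_verts := by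
    intro e he
    rw [hE, List.mem_flatMap] at he
    obtain ⟨tri, htri, hmem⟩ := he
    obtain ⟨⟨a1, a2⟩, ⟨b1, b2⟩, ⟨c1, c2⟩⟩ := hpre tri htri
    simp [pvSix] at hmem
    rcases hmem with h | h | h | h | h | h <;> (rw [Prod.ext_iff] at h; obtain ⟨h1, h2⟩ := h) <;>
      simp_all
  -- A in edge-fold form
  have hA : build_vertex_adjacency_py total_verts tri_faces
      = (E.foldl (fun a e => PySem.List.pySetD a e.1
            (PySem.Set.add (PySem.List.pyGetD a e.1 PySem.Set.empty) e.2))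
          ((PySem.List.pyRange 0 total_verts 1).map (fun _ => PySem.Set.empty))).map
          (fun nei => PySem.List.sorted nei (fun x => x)) := by
    rw [build_vertex_adjacency_py]
    have h1 : (fun (adj : List (PySem.Set Int)) (tri : Int × Int × Int) =>
        pvAddAt (pvAddAt (pvAddAt (pvAddAt (pvAddAt (pvAddAt adj tri.1 tri.2.1) tri.1 tri.2.2)
          tri.2.1 tri.1) tri.2.1 tri.2.2) tri.2.2 tri.1) tri.2.2 tri.2.1)
        = fun adj tri => (pvSix tri).foldl (fun a e => PySem.List.pySetD a e.1
            (PySem.Set.add (PySem.List.pyGetD a e.1 PySem.Set.empty) e.2)) adj := by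
      funext adj tri
      simp [pvSix, pvAddAt]
    rw [h1, pv_foldl_flatMap]
  -- B in edge-fold form
  have hB : build_vertex_adjacency_py_alt total_verts tri_faces
      = ((PySem.List.sorted2 E (fun e => e.1) (fun e => e.2)).foldl
          (fun a e => PySem.List.pySetD a e.1 (pvDedupStep (PySem.List.pyGetD a e.1 []) e.2))
          ((PySem.List.pyRange 0 total_verts 1).map (fun _ => ([] : List Int)))) := by
    rw [build_vertex_adjacency_py_alt]
    have h1 : (fun (es : List (Int × Int)) (tri : Int × Int × Int) =>
        es ++ [(tri.1, tri.2.1), (tri.1, tri.2.2), (tri.2.1, tri.1), (tri.2.1, tri.2.2),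
          (tri.2.2, tri.1), (tri.2.2, tri.2.1)])
        = fun es tri => es ++ pvSix tri := by
      funext es tri; simp [pvSix]
    rw [h1, PySem.List.foldl_append_eq_flatMap, List.nil_append, ← hE]
    have h2 : (fun (adj : List (List Int)) (e : Int × Int) =>
        if (PySem.List.pyGetD adj e.1 []).getLast? = some e.2 then adj
        else PySem.List.pySetD adj e.1 ((PySem.List.pyGetD adj e.1 []) ++ [e.2]))
        = fun adj e => PySem.List.pySetD adj e.1 (pvDedupStep (PySem.List.pyGetD adj e.1 []) e.2) := by
      funext adj e
      rw [pvDedupStep]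
      split_ifs with h
      · rw [pv_set_get_self]
      · rfl
    rw [h2]
  rw [hA, hB]
  -- now compare pointwise
  set SE := PySem.List.sorted2 E (fun e => e.1) (fun e => e.2) with hSE
  have hSEmem : ∀ e, e ∈ SE ↔ e ∈ E := fun e => (PySem.List.sorted2_perm E _ _ _).mem_iff
  have hSEbound : ∀ e ∈ SE, 0 ≤ e.1 ∧ e.1 < total_verts ∧ 0 ≤ e.2 ∧ e.2 < total_verts := by
    intro e he; exact hbound e ((hSEmem e).mp he)
  set N := (total_verts - 0).toNat with hN
  have hlenA : ((PySem.List.pyRange 0 total_verts 1).map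
      (fun _ => (PySem.Set.empty : PySem.Set Int))).length = N := by
    simp [PySem.List.length_pyRange_one]; omega
  have hlenB : ((PySem.List.pyRange 0 total_verts 1).map (fun _ => ([] : List Int))).length = N := by
    simp [PySem.List.length_pyRange_one]; omega
  apply List.ext_getElem?
  intro i
  by_cases hi : i < N
  · -- in range
    have hiN : ((i : Int)) < total_verts := by omega
    have hboundA : ∀ e ∈ E, 0 ≤ e.1 ∧ e.1 < ((((PySem.List.pyRange 0 total_verts 1).map
        (fun _ => (PySem.Set.empty : PySem.Set Int))).length : Int)) := by
      intro e he; obtain ⟨x1, x2, _, _⟩ := hbound e he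
      rw [hlenA]; exact ⟨x1, by omega⟩
    have hboundB : ∀ e ∈ SE, 0 ≤ e.1 ∧ e.1 < ((((PySem.List.pyRange 0 total_verts 1).map
        (fun _ => ([] : List Int))).length : Int)) := by
      intro e he; obtain ⟨x1, x2, _, _⟩ := hSEbound e he
      rw [hlenB]; exact ⟨x1, by omega⟩
    rw [List.getElem?_map, pv_foldl_set_getElem? _ _ _ _ i (by rw [hlenA]; exact hi) hboundA,
      pv_foldl_set_getElem? _ _ _ _ i (by rw [hlenB]; exact hi) hboundB]
    have hd0A : ((PySem.List.pyRange 0 total_verts 1).map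
        (fun _ => (PySem.Set.empty : PySem.Set Int))).getD i PySem.Set.empty = PySem.Set.empty := by
      rw [List.getD_eq_getElem _ _ (by rw [hlenA]; exact hi), List.getElem_map]
    have hd0B : ((PySem.List.pyRange 0 total_verts 1).map (fun _ => ([] : List Int))).getD i [] = [] := by
      rw [List.getD_eq_getElem _ _ (by rw [hlenB]; exact hi), List.getElem_map]
    rw [hd0A, hd0B]
    simp only [Option.map_some]
    congr 1
    -- per-row goal
    set Vk := ((E.filter (fun e => e.1 == (i : Int))).map (·.2)) with hVk
    set Lk := ((SE.filter (fun e => e.1 == (i : Int))).map (·.2)) with hLk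
    have hfoldA : Vk.foldl PySem.Set.add PySem.Set.empty = PySem.Set.ofList Vk :=
      (PySem.Set.ofList_eq_foldl Vk).symm
    have hLkle : Lk.Pairwise (· ≤ ·) := by
      rw [hLk, List.pairwise_map]
      refine List.Pairwise.imp_of_mem ?_ ((pv_sorted2_pairwise E).filter _)
      intro a b ha hb hab
      have ha1 : a.1 = (i : Int) := by simpa using (List.mem_filter.mp ha).2
      have hb1 : b.1 = (i : Int) := by simpa using (List.mem_filter.mp hb).2
      simp [pvLexLt, ha1, hb1] at hab ⊢
      omega
    obtain ⟨hWlt, hWmem⟩ := pv_dedup_gen Lk [] hLkle (by simp) (by simp)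
    have hmemVL : ∀ x, x ∈ Lk ↔ x ∈ Vk := by
      intro x
      rw [hVk, hLk]
      simp only [List.mem_map, List.mem_filter]
      constructor
      · rintro ⟨e, ⟨he, hp⟩, rfl⟩; exact ⟨e, ⟨(hSEmem e).mp he, hp⟩, rfl⟩
      · rintro ⟨e, ⟨he, hp⟩, rfl⟩; exact ⟨e, ⟨(hSEmem e).mpr he, hp⟩, rfl⟩
    apply PySem.List.sorted_eq_of_perm_of_pairwise_lt
    · rw [hfoldA]
      rw [List.perm_ext_iff_of_nodup (hWlt.imp ne_of_lt) (PySem.Set.nodup_ofList Vk)]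
      intro x
      rw [hWmem x, PySem.Set.mem_ofList]
      simp [hmemVL x]
    · exact hWlt
  · -- out of range: both none
    have h1 : ((E.foldl (fun a e => PySem.List.pySetD a e.1
        (PySem.Set.add (PySem.List.pyGetD a e.1 PySem.Set.empty) e.2))
        ((PySem.List.pyRange 0 total_verts 1).map (fun _ => PySem.Set.empty))).map
        (fun nei => PySem.List.sorted nei (fun x => x))).length = N := by
      rw [List.length_map, pv_foldl_set_length, hlenA]
    have h2 : (SE.foldl (fun a e => PySem.List.pySetD a e.1
        (pvDedupStep (PySem.List.pyGetD a e.1 []) e.2))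
        ((PySem.List.pyRange 0 total_verts 1).map (fun _ => ([] : List Int)))).length = N := by
      rw [pv_foldl_set_length, hlenB]
    rw [List.getElem?_eq_none (by rw [h1]; omega), List.getElem?_eq_none (by rw [h2]; omega)]
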